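-- pv_equiv track=rewrite | github.com/shankar-1403/pcred_financial_analyzer | backend/banks/federal.py | _detect_columns_federal
-- ===== SOURCE A (Python) =====
-- HEADER_MAP = {
--     "date": [
--         "date",
--     ],
--     "description": [
--         "particulars",
--         "description",
--         "narration",
--     ],
--     "debit": [
--         "withdrawals",
--         "withdrawal",
--         "debit",
--         "dr",
--     ],
--     "credit": [
--         "deposits",
--         "deposit",
--         "credit",
--         "cr",
--     ],
--     "balance": [
--         "balance",
--         "running balance",
--     ],
-- }
--
-- def _detect_columns_federal(row_clean):
--     """
--     Federal Bank-specific column detector.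
--     Uses exact match first, then guarded substring (4+ chars only).
--     base.py is never modified.
--     """
--     mapping = {}
--     for field, variants in HEADER_MAP.items():
--         # Pass 1: exact match
--         for idx, cell in enumerate(row_clean):
--             if cell in variants:
--                 mapping[field] = idx
--                 break
--         if field in mapping:
--             continue
--         # Pass 2: substring only for 4+ char aliases
--         for idx, cell in enumerate(row_clean):
--             if any(len(v) >= 4 and v in cell for v in variants):
--                 mapping[field] = idx
--                 break
--     return mapping if len(mapping) >= 3 else None
-- ===== SOURCE B (Python) =====
-- HEADER_MAP = {
--     "date": [
--         "date",
--     ],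
--     "description": [
--         "particulars",
--         "description",
--         "narration",
--     ],
--     "debit": [
--         "withdrawals",
--         "withdrawal",
--         "debit",
--         "dr",
--     ],
--     "credit": [
--         "deposits",
--         "deposit",
--         "credit",
--         "cr",
--     ],
--     "balance": [
--         "balance",
--         "running balance",
--     ],
-- }
--
-- def _detect_columns_federal(row_clean):
--     # Single sweep over the cells, recording for each field the first exact
--     # and the first substring (4+ char alias) hit; then resolve exact-first.
--     first_exact = {}
--     first_substr = {}
--     for idx, cell in enumerate(row_clean):
--         for field, variants in HEADER_MAP.items():
--             if field not in first_exact and cell in variants: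
--                 first_exact[field] = idx
--             if field not in first_substr and any(len(v) >= 4 and v in cell for v in variants):
--                 first_substr[field] = idx
--     mapping = {}
--     for field in HEADER_MAP:
--         if field in first_exact:
--             mapping[field] = first_exact[field]
--         elif field in first_substr:
--             mapping[field] = first_substr[field]
--     return mapping if len(mapping) >= 3 else None
-- ===== Notes on version B (the rewrite author's own statement) =====
-- stated objective: alternative
-- what changed: Replaced A's per-field double scan of the row (exact pass, then substring pass, per HEADER_MAP entry) by one single sweep over the cells that records first-exact and first-substring hits per field in two dicts, followed by a separate exact-first resolution pass over HEADER_MAP.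
import Mathlib
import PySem

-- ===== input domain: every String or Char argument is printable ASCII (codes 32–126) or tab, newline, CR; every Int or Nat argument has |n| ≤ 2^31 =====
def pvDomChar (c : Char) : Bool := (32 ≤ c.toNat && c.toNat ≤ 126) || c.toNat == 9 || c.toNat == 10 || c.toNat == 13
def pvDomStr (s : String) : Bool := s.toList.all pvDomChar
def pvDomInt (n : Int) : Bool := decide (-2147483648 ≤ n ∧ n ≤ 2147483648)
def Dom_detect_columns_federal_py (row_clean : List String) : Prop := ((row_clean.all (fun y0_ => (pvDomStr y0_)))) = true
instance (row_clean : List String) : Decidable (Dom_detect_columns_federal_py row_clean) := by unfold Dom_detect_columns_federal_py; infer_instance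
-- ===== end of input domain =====

-- B replaces A's per-field pair of scans over the row by one sweep over the cells recording
-- first exact / first substring hits per field in two dicts, then an exact-first resolution pass.

-- shared module constant HEADER_MAP (insertion order) and the two membership tests both Pythons contain
def headerMap : List (String × List String) :=
  [("date", ["date"]),
   ("description", ["particulars", "description", "narration"]),
   ("debit", ["withdrawals", "withdrawal", "debit", "dr"]),
   ("credit", ["deposits", "deposit", "credit", "cr"]),
   ("balance", ["balance", "running balance"])]

-- 'cell in variants'
def pvExact (variants : List String) (cell : String) : Bool := variants.contains cell
-- 'any(len(v) >= 4 and v in cell for v in variants)'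
def pvSub (variants : List String) (cell : String) : Bool :=
  variants.any (fun v => decide (4 ≤ (PySem.Str.len v)) && PySem.Str.isIn v cell)

-- ===== PORT A =====
-- 'for idx, cell in enumerate(row_clean): if p(cell): …; break' — first matching index
def pvFindA (p : String → Bool) : Int → List String → Option Int
  | _, [] => none
  | i, c :: cs => if p c then some i else pvFindA p (i + 1) cs

-- body of 'for field, variants in HEADER_MAP.items():' (pass 1, 'continue', pass 2)
def pvFieldA (row_clean : List String) (m : PySem.Dict String Int) (fv : String × List String) :
    PySem.Dict String Int :=
  match pvFindA (fun c => pvExact fv.2 c) 0 row_clean with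
  | some i => m.insert fv.1 i
  | none =>
    match pvFindA (fun c => pvSub fv.2 c) 0 row_clean with
    | some i => m.insert fv.1 i
    | none => m

def detect_columns_federal_py (row_clean : List String) : Option (List (String × Int)) :=
  let mapping := headerMap.foldl (pvFieldA row_clean) PySem.Dict.empty
  if 3 ≤ mapping.size then some mapping.items else none

-- ===== PORT B =====
-- inner 'for field, variants in HEADER_MAP.items():' body of the sweep
def pvStep (cell : String) (i : Int)
    (st : PySem.Dict String Int × PySem.Dict String Int) (fv : String × List String) :
    PySem.Dict String Int × PySem.Dict String Int :=
  (if !st.1.contains fv.1 && pvExact fv.2 cell then st.1.insert fv.1 i else st.1,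
   if !st.2.contains fv.1 && pvSub fv.2 cell then st.2.insert fv.1 i else st.2)

-- 'for idx, cell in enumerate(row_clean): for field, variants in HEADER_MAP.items(): …'
def pvSweep (l : List (Int × String)) (st : PySem.Dict String Int × PySem.Dict String Int) :
    PySem.Dict String Int × PySem.Dict String Int :=
  l.foldl (fun st ic => headerMap.foldl (pvStep ic.2 ic.1) st) st

-- resolution pass body: exact hit first, else substring hit
def pvResolveB (fs : PySem.Dict String Int × PySem.Dict String Int)
    (m : PySem.Dict String Int) (fv : String × List String) : PySem.Dict String Int :=
  match fs.1.get? fv.1 with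
  | some i => m.insert fv.1 i
  | none =>
    match fs.2.get? fv.1 with
    | some i => m.insert fv.1 i
    | none => m

def detect_columns_federal_py_alt (row_clean : List String) : Option (List (String × Int)) :=
  let fs := pvSweep (PySem.List.enumerate row_clean 0) (PySem.Dict.empty, PySem.Dict.empty)
  let mapping := headerMap.foldl (pvResolveB fs) PySem.Dict.empty
  if 3 ≤ mapping.size then some mapping.items else none

-- ===== PRECONDITION & SPEC =====
def Spec_detect_columns_federal_py (row_clean : List String) (out : Option (List (String × Int))) : Prop := out = detect_columns_federal_py_alt row_clean
instance (row_clean : List String) (out : Option (List (String × Int))) : Decidable (Spec_detect_columns_federal_py row_clean out) := by unfold Spec_detect_columns_federal_py; infer_instance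

-- ===== CLAIM (what is proved, stated in full; the proofs are below) =====
def Claim_equal_detect_columns_federal_py : Prop := ∀ (row_clean : List String), Dom_detect_columns_federal_py row_clean → Spec_detect_columns_federal_py row_clean (detect_columns_federal_py row_clean)

-- ===== LEMMAS AND PROOFS =====

-- the inner sweep step leaves every field not among the entries' keys untouched
theorem pvStep_fold_ne (entries : List (String × List String)) (c : String) (i : Int)
    (st : PySem.Dict String Int × PySem.Dict String Int) (f : String)
    (h : f ∉ entries.map (·.1)) :
    ((entries.foldl (pvStep c i) st).1.get? f = st.1.get? f) ∧
    ((entries.foldl (pvStep c i) st).2.get? f = st.2.get? f) := by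
  induction entries generalizing st with
  | nil => exact ⟨rfl, rfl⟩
  | cons e rest ih =>
    simp only [List.map_cons, List.mem_cons] at h
    push Not at h
    have hne : f ≠ e.1 := h.1
    have := ih (pvStep c i st e) h.2
    constructor
    · rw [List.foldl_cons, this.1]
      simp only [pvStep]; split
      · exact PySem.Dict.get?_insert_of_ne _ _ hne
      · rfl
    · rw [List.foldl_cons, this.2]
      simp only [pvStep]; split
      · exact PySem.Dict.get?_insert_of_ne _ _ hne
      · rfl

-- after the inner step over entries with distinct keys, field f's slot is its old value,
-- else the current index if the matching test fires on this cell
theorem pvStep_fold_get (entries : List (String × List String)) (c : String) (i : Int)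
    (st : PySem.Dict String Int × PySem.Dict String Int) (f : String) (vs : List String)
    (hmem : (f, vs) ∈ entries) (hnd : (entries.map (·.1)).Nodup) :
    ((entries.foldl (pvStep c i) st).1.get? f
        = (st.1.get? f).or (if pvExact vs c then some i else none)) ∧
    ((entries.foldl (pvStep c i) st).2.get? f
        = (st.2.get? f).or (if pvSub vs c then some i else none)) := by
  induction entries generalizing st with
  | nil => cases hmem
  | cons e rest ih =>
    simp only [List.map_cons, List.nodup_cons] at hnd
    rcases List.mem_cons.mp hmem with heq | hmem'
    · subst heq
      have hrest : f ∉ rest.map (·.1) := hnd.1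
      have hpres := pvStep_fold_ne rest c i (pvStep c i st (f, vs)) f hrest
      rw [List.foldl_cons, hpres.1, hpres.2]
      constructor <;> simp only [pvStep] <;> split <;>
        rename_i hcond
      · simp only [Bool.and_eq_true, Bool.not_eq_true'] at hcond
        rw [PySem.Dict.get?_insert_self]
        have : st.1.get? f = none := by
          rw [PySem.Dict.get?_eq_none_iff_contains, hcond.1]
        rw [this, hcond.2]; rfl
      · rcases hb : st.1.contains f with _ | _
        · have : st.1.get? f = none := by rw [PySem.Dict.get?_eq_none_iff_contains, hb]
          rw [this]
          have : pvExact vs c = false := by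
            by_contra hx
            exact hcond (by simp [hb, eq_true_of_ne_false hx])
          rw [this]; rfl
        · have : ∃ x, st.1.get? f = some x := by
            rcases hg : st.1.get? f with _ | x
            · rw [PySem.Dict.get?_eq_none_iff_contains] at hg; rw [hg] at hb; cases hb
            · exact ⟨x, rfl⟩
          rcases this with ⟨x, hx⟩
          rw [hx]; rfl
      · simp only [Bool.and_eq_true, Bool.not_eq_true'] at hcond
        rw [PySem.Dict.get?_insert_self]
        have : st.2.get? f = none := by
          rw [PySem.Dict.get?_eq_none_iff_contains, hcond.1]
        rw [this, hcond.2]; rfl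
      · rcases hb : st.2.contains f with _ | _
        · have : st.2.get? f = none := by rw [PySem.Dict.get?_eq_none_iff_contains, hb]
          rw [this]
          have : pvSub vs c = false := by
            by_contra hx
            exact hcond (by simp [hb, eq_true_of_ne_false hx])
          rw [this]; rfl
        · have : ∃ x, st.2.get? f = some x := by
            rcases hg : st.2.get? f with _ | x
            · rw [PySem.Dict.get?_eq_none_iff_contains] at hg; rw [hg] at hb; cases hb
            · exact ⟨x, rfl⟩
          rcases this with ⟨x, hx⟩
          rw [hx]; rfl
    · have hne : f ≠ e.1 := by
        intro hf
        exact hnd.1 (hf ▸ (List.mem_map.mpr ⟨(f, vs), hmem', rfl⟩))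
      have hstep := pvStep_fold_ne [e] c i st f (by simpa using hne)
      have := ih (pvStep c i st e) hmem' hnd.2
      rw [List.foldl_cons]
      simp only [List.foldl_cons, List.foldl_nil] at hstep
      rw [this.1, this.2, hstep.1, hstep.2]
      exact ⟨rfl, rfl⟩

-- the whole sweep: field f's slot is its old value or else the first matching index in l
theorem pvSweep_get (l : List (Int × String)) (st : PySem.Dict String Int × PySem.Dict String Int)
    (f : String) (vs : List String) (hmem : (f, vs) ∈ headerMap) :
    ((pvSweep l st).1.get? f
        = (st.1.get? f).or ((l.find? (fun ic => pvExact vs ic.2)).map (·.1))) ∧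
    ((pvSweep l st).2.get? f
        = (st.2.get? f).or ((l.find? (fun ic => pvSub vs ic.2)).map (·.1))) := by
  have hnd : ((headerMap.map (·.1)).Nodup) := by decide
  induction l generalizing st with
  | nil => simp [pvSweep]
  | cons ic rest ih =>
    have hstep := pvStep_fold_get headerMap ic.2 ic.1 st f vs hmem hnd
    have hrest := ih (headerMap.foldl (pvStep ic.2 ic.1) st)
    constructor
    · rw [show (pvSweep (ic :: rest) st) = pvSweep rest (headerMap.foldl (pvStep ic.2 ic.1) st) from rfl,
        hrest.1, hstep.1, List.find?_cons]
      split <;> rename_i hp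
      · rcases st.1.get? f with _ | x <;> simp [hp]
      · have : pvExact vs ic.2 = false := by simpa using hp
        simp [this]
    · rw [show (pvSweep (ic :: rest) st) = pvSweep rest (headerMap.foldl (pvStep ic.2 ic.1) st) from rfl,
        hrest.2, hstep.2, List.find?_cons]
      split <;> rename_i hp
      · rcases st.2.get? f with _ | x <;> simp [hp]
      · have : pvSub vs ic.2 = false := by simpa using hp
        simp [this]

-- A's break-loop is find? over the enumeration
theorem pvFindA_eq_find? (p : String → Bool) (l : List String) (i : Int) :
    pvFindA p i l = ((PySem.List.enumerate l i).find? (fun ic => p ic.2)).map (·.1) := by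
  induction l generalizing i with
  | nil => simp [pvFindA, PySem.List.enumerate_nil]
  | cons c cs ih =>
    rw [PySem.List.enumerate_cons, List.find?_cons]
    simp only [pvFindA]
    split <;> rename_i hp
    · simp [hp]
    · simp only [Bool.not_eq_true] at hp
      simp [hp, ih]

-- ===== VERDICT (by name: the statement is the Claim_ definition above) =====
theorem detect_columns_federal_py_spec : Claim_equal_detect_columns_federal_py := by
  intro row _
  unfold Spec_detect_columns_federal_py detect_columns_federal_py detect_columns_federal_py_alt
  have hfold : headerMap.foldl (pvFieldA row) PySem.Dict.empty
      = headerMap.foldl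
          (pvResolveB (pvSweep (PySem.List.enumerate row 0) (PySem.Dict.empty, PySem.Dict.empty)))
          PySem.Dict.empty := by
    apply PySem.List.foldl_congr_mem
    intro m fv hfv
    have hmem : (fv.1, fv.2) ∈ headerMap := by simpa using hfv
    have hs := pvSweep_get (PySem.List.enumerate row 0) (PySem.Dict.empty, PySem.Dict.empty)
      fv.1 fv.2 hmem
    have h1 : (pvSweep (PySem.List.enumerate row 0) (PySem.Dict.empty, PySem.Dict.empty)).1.get? fv.1
        = pvFindA (fun c => pvExact fv.2 c) 0 row := by
      rw [hs.1, pvFindA_eq_find?]; rfl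
    have h2 : (pvSweep (PySem.List.enumerate row 0) (PySem.Dict.empty, PySem.Dict.empty)).2.get? fv.1
        = pvFindA (fun c => pvSub fv.2 c) 0 row := by
      rw [hs.2, pvFindA_eq_find?]; rfl
    unfold pvFieldA pvResolveB
    rw [h1, h2]
  rw [hfold]
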